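-- pv_equiv track=rewrite | github.com/agnel18/anki-fluent-forever-language-card-generator | languages/arabic/domain/ar_response_parser.py | _generate_meaning_from_role_and_features
-- ===== SOURCE A (Python) =====
-- from typing import Dict, List, Any, Tuple, Optional
--
-- def _generate_meaning_from_role_and_features(role: str, features: List[str]) -> str:
--     """Generate detailed meaning from grammatical role and linguistic features"""
--     role = role.lower()
--     features_set = set(f.lower() for f in features)
--
--     # Enhanced meanings for different roles
--     role_meanings = {
--         'pronoun': 'a word that replaces a noun to avoid repetition',
--         'noun': 'a word that names a person, place, thing, or idea',
--         'verb': 'a word that expresses an action, occurrence, or state of being',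
--         'imperfect_verb': 'a verb form indicating ongoing, habitual, or future action',
--         'perfect_verb': 'a verb form indicating completed action in the past',
--         'adjective': 'a word that describes or modifies a noun',
--         'preposition': 'a word that shows the relationship between a noun and other words',
--         'conjunction': 'a word that connects clauses, sentences, or words',
--         'particle': 'a short word that expresses grammatical relationships or emphasis',
--         'interrogative': 'a word used to form questions',
--         'negation': 'a word that expresses denial, absence, or opposition',
--         'definite_article': 'a word that marks a noun as specific or known',
--         'other': 'a grammatical element with specific function'
--     }
--
--     base_meaning = role_meanings.get(role, f'{role.replace("_", " ")}')
--
--     # Build detailed description from features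
--     descriptions = []
--
--     # Person features
--     if 'first_person' in features_set:
--         descriptions.append('speaker reference')
--     elif 'second_person' in features_set:
--         descriptions.append('listener reference')
--     elif 'third_person' in features_set:
--         descriptions.append('third party reference')
--
--     # Number features
--     if 'singular' in features_set:
--         descriptions.append('single entity')
--     elif 'plural' in features_set:
--         descriptions.append('multiple entities')
--     elif 'dual' in features_set:
--         descriptions.append('exactly two entities')
--
--     # Gender features
--     if 'masculine' in features_set:
--         descriptions.append('masculine gender')
--     elif 'feminine' in features_set:
--         descriptions.append('feminine gender')
--
--     # Case features (Arabic i'rab)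
--     if 'nominative' in features_set:
--         descriptions.append('subject case')
--     elif 'accusative' in features_set:
--         descriptions.append('object case')
--     elif 'genitive' in features_set:
--         descriptions.append('possessive case')
--
--     # Function features
--     if 'subject' in features_set:
--         descriptions.append('sentence subject')
--     elif 'object' in features_set:
--         descriptions.append('direct object')
--     elif 'predicate' in features_set:
--         descriptions.append('sentence predicate')
--
--     # Add any remaining features
--     remaining_features = [f for f in features if f.lower() not in {
--         'first_person', 'second_person', 'third_person', 'singular', 'plural', 'dual',
--         'masculine', 'feminine', 'nominative', 'accusative', 'genitive',
--         'subject', 'object', 'predicate'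
--     }]
--     descriptions.extend(remaining_features)
--
--     if descriptions:
--         return f"{base_meaning} ({'; '.join(descriptions)})"
--
--     return base_meaning
-- ===== SOURCE B (Python) =====
-- from typing import List
--
-- # Single pass over features: each feature is classified once via one dict lookup;
-- # per category we keep the best (lowest-rank) hit seen, unrecognized features are
-- # collected in order in the same pass. No feature set is built and no per-key
-- # membership chains are run.
--
-- _ROLE_MEANINGS = {
--     'pronoun': 'a word that replaces a noun to avoid repetition',
--     'noun': 'a word that names a person, place, thing, or idea',
--     'verb': 'a word that expresses an action, occurrence, or state of being',
--     'imperfect_verb': 'a verb form indicating ongoing, habitual, or future action',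
--     'perfect_verb': 'a verb form indicating completed action in the past',
--     'adjective': 'a word that describes or modifies a noun',
--     'preposition': 'a word that shows the relationship between a noun and other words',
--     'conjunction': 'a word that connects clauses, sentences, or words',
--     'particle': 'a short word that expresses grammatical relationships or emphasis',
--     'interrogative': 'a word used to form questions',
--     'negation': 'a word that expresses denial, absence, or opposition',
--     'definite_article': 'a word that marks a noun as specific or known',
--     'other': 'a grammatical element with specific function'
-- }
--
-- # feature -> (category index, rank within category, description)
-- _FEATURE_INFO = {
--     'first_person':  (0, 0, 'speaker reference'),
--     'second_person': (0, 1, 'listener reference'),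
--     'third_person':  (0, 2, 'third party reference'),
--     'singular':      (1, 0, 'single entity'),
--     'plural':        (1, 1, 'multiple entities'),
--     'dual':          (1, 2, 'exactly two entities'),
--     'masculine':     (2, 0, 'masculine gender'),
--     'feminine':      (2, 1, 'feminine gender'),
--     'nominative':    (3, 0, 'subject case'),
--     'accusative':    (3, 1, 'object case'),
--     'genitive':      (3, 2, 'possessive case'),
--     'subject':       (4, 0, 'sentence subject'),
--     'object':        (4, 1, 'direct object'),
--     'predicate':     (4, 2, 'sentence predicate'),
-- }
--
--
-- def _generate_meaning_from_role_and_features(role: str, features: List[str]) -> str: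
--     """Generate detailed meaning from grammatical role and linguistic features (single pass)"""
--     role = role.lower()
--     base_meaning = _ROLE_MEANINGS.get(role, role.replace('_', ' '))
--
--     slots = {}          # category index -> (rank, description) of best hit so far
--     leftovers = []      # unrecognized features, original order and case
--     for f in features:
--         info = _FEATURE_INFO.get(f.lower())
--         if info is None:
--             leftovers.append(f)
--         else:
--             cat, rank, desc = info
--             cur = slots.get(cat)
--             if cur is None or rank < cur[0]:
--                 slots[cat] = (rank, desc)
--
--     descriptions = [slots[c][1] for c in range(5) if c in slots]
--     descriptions += leftovers
--
--     if descriptions: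
--         return f"{base_meaning} ({'; '.join(descriptions)})"
--     return base_meaning
-- ===== Notes on version B (the rewrite author's own statement) =====
-- stated objective: alternative
-- what changed: Replaces A's feature-set construction plus five hard-coded if/elif membership chains by a single pass over the features list: each feature is classified once through a feature->(category,rank,description) dict, keeping the best-ranked hit per category and collecting unrecognized features in the same pass.
import Mathlib
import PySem

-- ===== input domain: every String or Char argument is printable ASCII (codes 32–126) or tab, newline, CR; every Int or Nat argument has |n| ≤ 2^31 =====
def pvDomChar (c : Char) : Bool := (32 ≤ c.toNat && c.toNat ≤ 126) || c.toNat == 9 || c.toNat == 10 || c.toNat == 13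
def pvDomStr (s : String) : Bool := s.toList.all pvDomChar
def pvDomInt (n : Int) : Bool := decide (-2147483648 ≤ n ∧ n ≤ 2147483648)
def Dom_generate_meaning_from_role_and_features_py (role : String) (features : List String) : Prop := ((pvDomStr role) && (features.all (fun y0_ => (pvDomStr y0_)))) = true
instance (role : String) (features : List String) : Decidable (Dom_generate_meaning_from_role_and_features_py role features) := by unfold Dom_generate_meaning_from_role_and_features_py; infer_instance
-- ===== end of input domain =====

-- B replaces A's feature-set plus five if/elif membership chains by a single pass over the
-- features list keeping the best-ranked hit per category (objective: alternative, same cost).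

-- ===== PORT A =====
-- role_meanings dict literal of A (Source B keeps the same table as _ROLE_MEANINGS)
def pvRoleMeanings : PySem.Dict String String := PySem.Dict.ofList
  [("pronoun", "a word that replaces a noun to avoid repetition"),
   ("noun", "a word that names a person, place, thing, or idea"),
   ("verb", "a word that expresses an action, occurrence, or state of being"),
   ("imperfect_verb", "a verb form indicating ongoing, habitual, or future action"),
   ("perfect_verb", "a verb form indicating completed action in the past"),
   ("adjective", "a word that describes or modifies a noun"),
   ("preposition", "a word that shows the relationship between a noun and other words"),
   ("conjunction", "a word that connects clauses, sentences, or words"),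
   ("particle", "a short word that expresses grammatical relationships or emphasis"),
   ("interrogative", "a word used to form questions"),
   ("negation", "a word that expresses denial, absence, or opposition"),
   ("definite_article", "a word that marks a noun as specific or known"),
   ("other", "a grammatical element with specific function")]

def generate_meaning_from_role_and_features_py (role : String) (features : List String) : String :=
  let role := PySem.Str.lower role
  let features_set : PySem.Set String := PySem.Set.ofList (features.map (fun f => PySem.Str.lower f))
  let base_meaning := PySem.Dict.getD pvRoleMeanings role (PySem.Str.replace role "_" " ")
  let descriptions : List String := []
  -- Person features
  let descriptions :=
    if PySem.Set.contains features_set "first_person" then descriptions ++ ["speaker reference"]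
    else if PySem.Set.contains features_set "second_person" then descriptions ++ ["listener reference"]
    else if PySem.Set.contains features_set "third_person" then descriptions ++ ["third party reference"]
    else descriptions
  -- Number features
  let descriptions :=
    if PySem.Set.contains features_set "singular" then descriptions ++ ["single entity"]
    else if PySem.Set.contains features_set "plural" then descriptions ++ ["multiple entities"]
    else if PySem.Set.contains features_set "dual" then descriptions ++ ["exactly two entities"]
    else descriptions
  -- Gender features
  let descriptions :=
    if PySem.Set.contains features_set "masculine" then descriptions ++ ["masculine gender"]
    else if PySem.Set.contains features_set "feminine" then descriptions ++ ["feminine gender"]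
    else descriptions
  -- Case features
  let descriptions :=
    if PySem.Set.contains features_set "nominative" then descriptions ++ ["subject case"]
    else if PySem.Set.contains features_set "accusative" then descriptions ++ ["object case"]
    else if PySem.Set.contains features_set "genitive" then descriptions ++ ["possessive case"]
    else descriptions
  -- Function features
  let descriptions :=
    if PySem.Set.contains features_set "subject" then descriptions ++ ["sentence subject"]
    else if PySem.Set.contains features_set "object" then descriptions ++ ["direct object"]
    else if PySem.Set.contains features_set "predicate" then descriptions ++ ["sentence predicate"]
    else descriptions
  -- Add any remaining features
  let remaining_features := features.filter (fun f =>
    !(PySem.Set.contains (PySem.Set.ofList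
      ["first_person", "second_person", "third_person", "singular", "plural", "dual",
       "masculine", "feminine", "nominative", "accusative", "genitive",
       "subject", "object", "predicate"]) (PySem.Str.lower f)))
  let descriptions := descriptions ++ remaining_features
  if descriptions ≠ [] then base_meaning ++ " (" ++ PySem.Str.join "; " descriptions ++ ")"
  else base_meaning

-- ===== PORT B =====
-- _FEATURE_INFO of Source B: feature -> (category index, rank within category, description)
def pvFeatureInfo : PySem.Dict String (Int × Int × String) := PySem.Dict.ofList
  [("first_person", (0, 0, "speaker reference")),
   ("second_person", (0, 1, "listener reference")),
   ("third_person", (0, 2, "third party reference")),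
   ("singular", (1, 0, "single entity")),
   ("plural", (1, 1, "multiple entities")),
   ("dual", (1, 2, "exactly two entities")),
   ("masculine", (2, 0, "masculine gender")),
   ("feminine", (2, 1, "feminine gender")),
   ("nominative", (3, 0, "subject case")),
   ("accusative", (3, 1, "object case")),
   ("genitive", (3, 2, "possessive case")),
   ("subject", (4, 0, "sentence subject")),
   ("object", (4, 1, "direct object")),
   ("predicate", (4, 2, "sentence predicate"))]

-- the loop body of Source B's single pass: classify f, keep the best-ranked hit per category,
-- or append an unrecognized feature to leftovers
def pvBStep (st : PySem.Dict Int (Int × String) × List String) (f : String) :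
    PySem.Dict Int (Int × String) × List String :=
  match PySem.Dict.get? pvFeatureInfo (PySem.Str.lower f) with
  | none => (st.1, st.2 ++ [f])
  | some (cat, rank, desc) =>
    match PySem.Dict.get? st.1 cat with
    | none => (st.1.insert cat (rank, desc), st.2)
    | some cur => if rank < cur.1 then (st.1.insert cat (rank, desc), st.2) else st

def generate_meaning_from_role_and_features_py_alt (role : String) (features : List String) : String :=
  let role := PySem.Str.lower role
  let base_meaning := PySem.Dict.getD pvRoleMeanings role (PySem.Str.replace role "_" " ")
  let st := features.foldl pvBStep ((PySem.Dict.empty : PySem.Dict Int (Int × String)), ([] : List String))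
  -- [slots[c][1] for c in range(5) if c in slots]  ('c in slots' + slots[c] ported as one get?)
  let descriptions : List String := (PySem.List.pyRange 0 5 1).foldl (fun acc cI =>
      match PySem.Dict.get? st.1 cI with
      | some p => acc ++ [p.2]
      | none => acc) []
  let descriptions := descriptions ++ st.2
  if descriptions ≠ [] then base_meaning ++ " (" ++ PySem.Str.join "; " descriptions ++ ")"
  else base_meaning

-- ===== PRECONDITION & SPEC =====
def Spec_generate_meaning_from_role_and_features_py (role : String) (features : List String) (out : String) : Prop := out = generate_meaning_from_role_and_features_py_alt role features
instance (role : String) (features : List String) (out : String) : Decidable (Spec_generate_meaning_from_role_and_features_py role features out) := by unfold Spec_generate_meaning_from_role_and_features_py; infer_instance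

-- ===== CLAIM (what is proved, stated in full; the proofs are below) =====
def Claim_equal_generate_meaning_from_role_and_features_py : Prop := ∀ (role : String) (features : List String), Dom_generate_meaning_from_role_and_features_py role features → Spec_generate_meaning_from_role_and_features_py role features (generate_meaning_from_role_and_features_py role features)

-- ===== LEMMAS AND PROOFS =====

-- 'best of two hits': none is neutral, lower rank wins, ties keep the left argument
def pvMerge (a b : Option (Int × String)) : Option (Int × String) :=
  match b with
  | none => a
  | some (p, d) =>
    match a with
    | none => some (p, d)
    | some (q, e) => if p < q then some (p, d) else some (q, e)

-- the contribution of a single feature to category cI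
def pvContrib (cI : Int) (f : String) : Option (Int × String) :=
  match PySem.Dict.get? pvFeatureInfo (PySem.Str.lower f) with
  | some (c', p, d) => if c' = cI then some (p, d) else none
  | none => none

-- the best hit of category cI over a whole list
def pvCand (cI : Int) (fs : List String) : Option (Int × String) :=
  fs.foldl (fun o f => pvMerge o (pvContrib cI f)) none

-- membership test 'k in set(f.lower() for f in fs)' seen as a list scan
def pvHas (fs : List String) (k : String) : Bool :=
  (fs.map (fun f => PySem.Str.lower f)).contains k

def pvChain0 (fs : List String) : Option (Int × String) :=
  if pvHas fs "first_person" then some (0, "speaker reference")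
  else if pvHas fs "second_person" then some (1, "listener reference")
  else if pvHas fs "third_person" then some (2, "third party reference")
  else none

def pvChain1 (fs : List String) : Option (Int × String) :=
  if pvHas fs "singular" then some (0, "single entity")
  else if pvHas fs "plural" then some (1, "multiple entities")
  else if pvHas fs "dual" then some (2, "exactly two entities")
  else none

def pvChain2 (fs : List String) : Option (Int × String) :=
  if pvHas fs "masculine" then some (0, "masculine gender")
  else if pvHas fs "feminine" then some (1, "feminine gender")
  else none

def pvChain3 (fs : List String) : Option (Int × String) :=
  if pvHas fs "nominative" then some (0, "subject case")
  else if pvHas fs "accusative" then some (1, "object case")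
  else if pvHas fs "genitive" then some (2, "possessive case")
  else none

def pvChain4 (fs : List String) : Option (Int × String) :=
  if pvHas fs "subject" then some (0, "sentence subject")
  else if pvHas fs "object" then some (1, "direct object")
  else if pvHas fs "predicate" then some (2, "sentence predicate")
  else none

theorem pvMerge_none_left (b : Option (Int × String)) : pvMerge none b = b := by
  rcases b with _ | ⟨p, d⟩ <;> rfl

theorem pvMerge_none_right (a : Option (Int × String)) : pvMerge a none = a := rfl

theorem pvMerge_assoc (a b c : Option (Int × String)) :
    pvMerge (pvMerge a b) c = pvMerge a (pvMerge b c) := by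
  rcases a with _ | ⟨q, e⟩ <;> rcases b with _ | ⟨p, d⟩ <;> rcases c with _ | ⟨r, g⟩ <;>
    (try simp only [pvMerge_none_left, pvMerge_none_right])
  by_cases h1 : p < q <;> by_cases h2 : r < p <;> by_cases h3 : r < q <;>
    simp [pvMerge, h1, h2, h3] <;> omega

theorem pvFoldMerge (cI : Int) (fs : List String) :
    ∀ o, fs.foldl (fun o f => pvMerge o (pvContrib cI f)) o = pvMerge o (pvCand cI fs) := by
  induction fs with
  | nil => intro o; simp [pvCand, pvMerge_none_right]
  | cons f rest ih =>
    intro o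
    have h2 : pvCand cI (f :: rest) = pvMerge (pvContrib cI f) (pvCand cI rest) := by
      simp only [pvCand, List.foldl_cons, pvMerge_none_left]
      exact ih _
    simp only [List.foldl_cons, ih, h2, pvMerge_assoc]

theorem pvBStep_fst (st : PySem.Dict Int (Int × String) × List String) (f : String) (cI : Int) :
    PySem.Dict.get? (pvBStep st f).1 cI = pvMerge (PySem.Dict.get? st.1 cI) (pvContrib cI f) := by
  unfold pvBStep pvContrib
  cases hg : PySem.Dict.get? pvFeatureInfo (PySem.Str.lower f) with
  | none => simp [pvMerge]
  | some t =>
    obtain ⟨c0, p, d⟩ := t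
    by_cases hc : c0 = cI
    · subst hc
      cases hcur : PySem.Dict.get? st.1 c0 with
      | none => simp [hcur, pvMerge]
      | some cur =>
        by_cases hlt : p < cur.1
        · simp [hlt, hcur, pvMerge]
        · simp [hlt, hcur, pvMerge]
    · have hc2 : ¬ cI = c0 := fun h => hc h.symm
      cases hcur : PySem.Dict.get? st.1 c0 with
      | none => simp [hcur, hc, hc2, PySem.Dict.get?_insert, pvMerge]
      | some cur =>
        by_cases hlt : p < cur.1 <;> simp [hcur, hlt, PySem.Dict.get?_insert, hc, hc2, pvMerge]

theorem pvBStep_snd (st : PySem.Dict Int (Int × String) × List String) (f : String) :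
    (pvBStep st f).2 = st.2 ++
      (if (PySem.Dict.get? pvFeatureInfo (PySem.Str.lower f)).isSome then [] else [f]) := by
  unfold pvBStep
  cases hg : PySem.Dict.get? pvFeatureInfo (PySem.Str.lower f) with
  | none => simp
  | some t =>
    obtain ⟨c0, p, d⟩ := t
    cases hcur : PySem.Dict.get? st.1 c0 with
    | none => simp [hcur]
    | some cur => by_cases hlt : p < cur.1 <;> simp [hcur, hlt]

theorem pvFold_fst (fs : List String) :
    ∀ (st : PySem.Dict Int (Int × String) × List String) (cI : Int),
      PySem.Dict.get? (fs.foldl pvBStep st).1 cI =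
        pvMerge (PySem.Dict.get? st.1 cI) (pvCand cI fs) := by
  induction fs with
  | nil => intro st cI; simp [pvCand, pvMerge_none_right]
  | cons f rest ih =>
    intro st cI
    have h2 : pvCand cI (f :: rest) = pvMerge (pvContrib cI f) (pvCand cI rest) := by
      simp only [pvCand, List.foldl_cons, pvMerge_none_left]
      exact pvFoldMerge cI rest _
    rw [List.foldl_cons, ih, pvBStep_fst, h2, pvMerge_assoc]

theorem pvFold_snd (fs : List String) :
    ∀ (st : PySem.Dict Int (Int × String) × List String),
      (fs.foldl pvBStep st).2 = st.2 ++
        fs.filter (fun f => !(PySem.Dict.get? pvFeatureInfo (PySem.Str.lower f)).isSome) := by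
  induction fs with
  | nil => intro st; simp
  | cons f rest ih =>
    intro st
    rw [List.foldl_cons, ih, pvBStep_snd]
    cases hg : PySem.Dict.get? pvFeatureInfo (PySem.Str.lower f) <;>
      simp [hg]

set_option maxHeartbeats 2000000 in
theorem pvCand_spec (fs : List String) :
    pvCand 0 fs = pvChain0 fs ∧ pvCand 1 fs = pvChain1 fs ∧ pvCand 2 fs = pvChain2 fs ∧
    pvCand 3 fs = pvChain3 fs ∧ pvCand 4 fs = pvChain4 fs := by
  induction fs with
  | nil => exact ⟨rfl, rfl, rfl, rfl, rfl⟩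
  | cons f rest ih =>
    obtain ⟨ih0, ih1, ih2, ih3, ih4⟩ := ih
    have hstep : ∀ cI, pvCand cI (f :: rest) = pvMerge (pvContrib cI f) (pvCand cI rest) := by
      intro cI
      simp only [pvCand, List.foldl_cons, pvMerge_none_left]
      exact pvFoldMerge cI rest _
    have hhas : ∀ k, pvHas (f :: rest) k = ((decide (k = PySem.Str.lower f)) || pvHas rest k) := by
      intro k
      simp [pvHas]
    by_cases h1 : PySem.Str.lower f = "first_person"
    · have hc : PySem.Dict.get? pvFeatureInfo (PySem.Str.lower f) = some (0, 0, "speaker reference") := by rw [h1]; rfl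
      have hk0 : pvContrib 0 f = some ((0 : Int), "speaker reference") := by simp [pvContrib, hc]
      have hk1 : pvContrib 1 f = none := by simp [pvContrib, hc]
      have hk2 : pvContrib 2 f = none := by simp [pvContrib, hc]
      have hk3 : pvContrib 3 f = none := by simp [pvContrib, hc]
      have hk4 : pvContrib 4 f = none := by simp [pvContrib, hc]
      refine ⟨?_, ?_, ?_, ?_, ?_⟩ <;>
        simp [hstep, hk0, hk1, hk2, hk3, hk4, hhas, h1, ih0, ih1, ih2, ih3, ih4,
          pvChain0, pvChain1, pvChain2, pvChain3, pvChain4, pvMerge_none_left] <;>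
        (try split_ifs) <;> simp_all [pvMerge]
    by_cases h2 : PySem.Str.lower f = "second_person"
    · have hc : PySem.Dict.get? pvFeatureInfo (PySem.Str.lower f) = some (0, 1, "listener reference") := by rw [h2]; rfl
      have hk0 : pvContrib 0 f = some ((1 : Int), "listener reference") := by simp [pvContrib, hc]
      have hk1 : pvContrib 1 f = none := by simp [pvContrib, hc]
      have hk2 : pvContrib 2 f = none := by simp [pvContrib, hc]
      have hk3 : pvContrib 3 f = none := by simp [pvContrib, hc]
      have hk4 : pvContrib 4 f = none := by simp [pvContrib, hc]
      refine ⟨?_, ?_, ?_, ?_, ?_⟩ <;>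
        simp [hstep, hk0, hk1, hk2, hk3, hk4, hhas, h2, ih0, ih1, ih2, ih3, ih4,
          pvChain0, pvChain1, pvChain2, pvChain3, pvChain4, pvMerge_none_left] <;>
        (try split_ifs) <;> simp_all [pvMerge]
    by_cases h3 : PySem.Str.lower f = "third_person"
    · have hc : PySem.Dict.get? pvFeatureInfo (PySem.Str.lower f) = some (0, 2, "third party reference") := by rw [h3]; rfl
      have hk0 : pvContrib 0 f = some ((2 : Int), "third party reference") := by simp [pvContrib, hc]
      have hk1 : pvContrib 1 f = none := by simp [pvContrib, hc]
      have hk2 : pvContrib 2 f = none := by simp [pvContrib, hc]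
      have hk3 : pvContrib 3 f = none := by simp [pvContrib, hc]
      have hk4 : pvContrib 4 f = none := by simp [pvContrib, hc]
      refine ⟨?_, ?_, ?_, ?_, ?_⟩ <;>
        simp [hstep, hk0, hk1, hk2, hk3, hk4, hhas, h3, ih0, ih1, ih2, ih3, ih4,
          pvChain0, pvChain1, pvChain2, pvChain3, pvChain4, pvMerge_none_left] <;>
        (try split_ifs) <;> simp_all [pvMerge]
    by_cases h4 : PySem.Str.lower f = "singular"
    · have hc : PySem.Dict.get? pvFeatureInfo (PySem.Str.lower f) = some (1, 0, "single entity") := by rw [h4]; rfl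
      have hk0 : pvContrib 0 f = none := by simp [pvContrib, hc]
      have hk1 : pvContrib 1 f = some ((0 : Int), "single entity") := by simp [pvContrib, hc]
      have hk2 : pvContrib 2 f = none := by simp [pvContrib, hc]
      have hk3 : pvContrib 3 f = none := by simp [pvContrib, hc]
      have hk4 : pvContrib 4 f = none := by simp [pvContrib, hc]
      refine ⟨?_, ?_, ?_, ?_, ?_⟩ <;>
        simp [hstep, hk0, hk1, hk2, hk3, hk4, hhas, h4, ih0, ih1, ih2, ih3, ih4,
          pvChain0, pvChain1, pvChain2, pvChain3, pvChain4, pvMerge_none_left] <;>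
        (try split_ifs) <;> simp_all [pvMerge]
    by_cases h5 : PySem.Str.lower f = "plural"
    · have hc : PySem.Dict.get? pvFeatureInfo (PySem.Str.lower f) = some (1, 1, "multiple entities") := by rw [h5]; rfl
      have hk0 : pvContrib 0 f = none := by simp [pvContrib, hc]
      have hk1 : pvContrib 1 f = some ((1 : Int), "multiple entities") := by simp [pvContrib, hc]
      have hk2 : pvContrib 2 f = none := by simp [pvContrib, hc]
      have hk3 : pvContrib 3 f = none := by simp [pvContrib, hc]
      have hk4 : pvContrib 4 f = none := by simp [pvContrib, hc]
      refine ⟨?_, ?_, ?_, ?_, ?_⟩ <;>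
        simp [hstep, hk0, hk1, hk2, hk3, hk4, hhas, h5, ih0, ih1, ih2, ih3, ih4,
          pvChain0, pvChain1, pvChain2, pvChain3, pvChain4, pvMerge_none_left] <;>
        (try split_ifs) <;> simp_all [pvMerge]
    by_cases h6 : PySem.Str.lower f = "dual"
    · have hc : PySem.Dict.get? pvFeatureInfo (PySem.Str.lower f) = some (1, 2, "exactly two entities") := by rw [h6]; rfl
      have hk0 : pvContrib 0 f = none := by simp [pvContrib, hc]
      have hk1 : pvContrib 1 f = some ((2 : Int), "exactly two entities") := by simp [pvContrib, hc]
      have hk2 : pvContrib 2 f = none := by simp [pvContrib, hc]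
      have hk3 : pvContrib 3 f = none := by simp [pvContrib, hc]
      have hk4 : pvContrib 4 f = none := by simp [pvContrib, hc]
      refine ⟨?_, ?_, ?_, ?_, ?_⟩ <;>
        simp [hstep, hk0, hk1, hk2, hk3, hk4, hhas, h6, ih0, ih1, ih2, ih3, ih4,
          pvChain0, pvChain1, pvChain2, pvChain3, pvChain4, pvMerge_none_left] <;>
        (try split_ifs) <;> simp_all [pvMerge]
    by_cases h7 : PySem.Str.lower f = "masculine"
    · have hc : PySem.Dict.get? pvFeatureInfo (PySem.Str.lower f) = some (2, 0, "masculine gender") := by rw [h7]; rfl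
      have hk0 : pvContrib 0 f = none := by simp [pvContrib, hc]
      have hk1 : pvContrib 1 f = none := by simp [pvContrib, hc]
      have hk2 : pvContrib 2 f = some ((0 : Int), "masculine gender") := by simp [pvContrib, hc]
      have hk3 : pvContrib 3 f = none := by simp [pvContrib, hc]
      have hk4 : pvContrib 4 f = none := by simp [pvContrib, hc]
      refine ⟨?_, ?_, ?_, ?_, ?_⟩ <;>
        simp [hstep, hk0, hk1, hk2, hk3, hk4, hhas, h7, ih0, ih1, ih2, ih3, ih4,
          pvChain0, pvChain1, pvChain2, pvChain3, pvChain4, pvMerge_none_left] <;>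
        (try split_ifs) <;> simp_all [pvMerge]
    by_cases h8 : PySem.Str.lower f = "feminine"
    · have hc : PySem.Dict.get? pvFeatureInfo (PySem.Str.lower f) = some (2, 1, "feminine gender") := by rw [h8]; rfl
      have hk0 : pvContrib 0 f = none := by simp [pvContrib, hc]
      have hk1 : pvContrib 1 f = none := by simp [pvContrib, hc]
      have hk2 : pvContrib 2 f = some ((1 : Int), "feminine gender") := by simp [pvContrib, hc]
      have hk3 : pvContrib 3 f = none := by simp [pvContrib, hc]
      have hk4 : pvContrib 4 f = none := by simp [pvContrib, hc]
      refine ⟨?_, ?_, ?_, ?_, ?_⟩ <;>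
        simp [hstep, hk0, hk1, hk2, hk3, hk4, hhas, h8, ih0, ih1, ih2, ih3, ih4,
          pvChain0, pvChain1, pvChain2, pvChain3, pvChain4, pvMerge_none_left] <;>
        (try split_ifs) <;> simp_all [pvMerge]
    by_cases h9 : PySem.Str.lower f = "nominative"
    · have hc : PySem.Dict.get? pvFeatureInfo (PySem.Str.lower f) = some (3, 0, "subject case") := by rw [h9]; rfl
      have hk0 : pvContrib 0 f = none := by simp [pvContrib, hc]
      have hk1 : pvContrib 1 f = none := by simp [pvContrib, hc]
      have hk2 : pvContrib 2 f = none := by simp [pvContrib, hc]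
      have hk3 : pvContrib 3 f = some ((0 : Int), "subject case") := by simp [pvContrib, hc]
      have hk4 : pvContrib 4 f = none := by simp [pvContrib, hc]
      refine ⟨?_, ?_, ?_, ?_, ?_⟩ <;>
        simp [hstep, hk0, hk1, hk2, hk3, hk4, hhas, h9, ih0, ih1, ih2, ih3, ih4,
          pvChain0, pvChain1, pvChain2, pvChain3, pvChain4, pvMerge_none_left] <;>
        (try split_ifs) <;> simp_all [pvMerge]
    by_cases h10 : PySem.Str.lower f = "accusative"
    · have hc : PySem.Dict.get? pvFeatureInfo (PySem.Str.lower f) = some (3, 1, "object case") := by rw [h10]; rfl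
      have hk0 : pvContrib 0 f = none := by simp [pvContrib, hc]
      have hk1 : pvContrib 1 f = none := by simp [pvContrib, hc]
      have hk2 : pvContrib 2 f = none := by simp [pvContrib, hc]
      have hk3 : pvContrib 3 f = some ((1 : Int), "object case") := by simp [pvContrib, hc]
      have hk4 : pvContrib 4 f = none := by simp [pvContrib, hc]
      refine ⟨?_, ?_, ?_, ?_, ?_⟩ <;>
        simp [hstep, hk0, hk1, hk2, hk3, hk4, hhas, h10, ih0, ih1, ih2, ih3, ih4,
          pvChain0, pvChain1, pvChain2, pvChain3, pvChain4, pvMerge_none_left] <;>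
        (try split_ifs) <;> simp_all [pvMerge]
    by_cases h11 : PySem.Str.lower f = "genitive"
    · have hc : PySem.Dict.get? pvFeatureInfo (PySem.Str.lower f) = some (3, 2, "possessive case") := by rw [h11]; rfl
      have hk0 : pvContrib 0 f = none := by simp [pvContrib, hc]
      have hk1 : pvContrib 1 f = none := by simp [pvContrib, hc]
      have hk2 : pvContrib 2 f = none := by simp [pvContrib, hc]
      have hk3 : pvContrib 3 f = some ((2 : Int), "possessive case") := by simp [pvContrib, hc]
      have hk4 : pvContrib 4 f = none := by simp [pvContrib, hc]
      refine ⟨?_, ?_, ?_, ?_, ?_⟩ <;>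
        simp [hstep, hk0, hk1, hk2, hk3, hk4, hhas, h11, ih0, ih1, ih2, ih3, ih4,
          pvChain0, pvChain1, pvChain2, pvChain3, pvChain4, pvMerge_none_left] <;>
        (try split_ifs) <;> simp_all [pvMerge]
    by_cases h12 : PySem.Str.lower f = "subject"
    · have hc : PySem.Dict.get? pvFeatureInfo (PySem.Str.lower f) = some (4, 0, "sentence subject") := by rw [h12]; rfl
      have hk0 : pvContrib 0 f = none := by simp [pvContrib, hc]
      have hk1 : pvContrib 1 f = none := by simp [pvContrib, hc]
      have hk2 : pvContrib 2 f = none := by simp [pvContrib, hc]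
      have hk3 : pvContrib 3 f = none := by simp [pvContrib, hc]
      have hk4 : pvContrib 4 f = some ((0 : Int), "sentence subject") := by simp [pvContrib, hc]
      refine ⟨?_, ?_, ?_, ?_, ?_⟩ <;>
        simp [hstep, hk0, hk1, hk2, hk3, hk4, hhas, h12, ih0, ih1, ih2, ih3, ih4,
          pvChain0, pvChain1, pvChain2, pvChain3, pvChain4, pvMerge_none_left] <;>
        (try split_ifs) <;> simp_all [pvMerge]
    by_cases h13 : PySem.Str.lower f = "object"
    · have hc : PySem.Dict.get? pvFeatureInfo (PySem.Str.lower f) = some (4, 1, "direct object") := by rw [h13]; rfl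
      have hk0 : pvContrib 0 f = none := by simp [pvContrib, hc]
      have hk1 : pvContrib 1 f = none := by simp [pvContrib, hc]
      have hk2 : pvContrib 2 f = none := by simp [pvContrib, hc]
      have hk3 : pvContrib 3 f = none := by simp [pvContrib, hc]
      have hk4 : pvContrib 4 f = some ((1 : Int), "direct object") := by simp [pvContrib, hc]
      refine ⟨?_, ?_, ?_, ?_, ?_⟩ <;>
        simp [hstep, hk0, hk1, hk2, hk3, hk4, hhas, h13, ih0, ih1, ih2, ih3, ih4,
          pvChain0, pvChain1, pvChain2, pvChain3, pvChain4, pvMerge_none_left] <;>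
        (try split_ifs) <;> simp_all [pvMerge]
    by_cases h14 : PySem.Str.lower f = "predicate"
    · have hc : PySem.Dict.get? pvFeatureInfo (PySem.Str.lower f) = some (4, 2, "sentence predicate") := by rw [h14]; rfl
      have hk0 : pvContrib 0 f = none := by simp [pvContrib, hc]
      have hk1 : pvContrib 1 f = none := by simp [pvContrib, hc]
      have hk2 : pvContrib 2 f = none := by simp [pvContrib, hc]
      have hk3 : pvContrib 3 f = none := by simp [pvContrib, hc]
      have hk4 : pvContrib 4 f = some ((2 : Int), "sentence predicate") := by simp [pvContrib, hc]
      refine ⟨?_, ?_, ?_, ?_, ?_⟩ <;>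
        simp [hstep, hk0, hk1, hk2, hk3, hk4, hhas, h14, ih0, ih1, ih2, ih3, ih4,
          pvChain0, pvChain1, pvChain2, pvChain3, pvChain4, pvMerge_none_left] <;>
        (try split_ifs) <;> simp_all [pvMerge]
    have hnone : PySem.Dict.get? pvFeatureInfo (PySem.Str.lower f) = none := by
      rw [PySem.Dict.get?_eq_none_iff_not_mem_keys]
      have hk : PySem.Dict.keys pvFeatureInfo = ["first_person", "second_person", "third_person", "singular", "plural", "dual", "masculine", "feminine", "nominative", "accusative", "genitive", "subject", "object", "predicate"] := rfl
      rw [hk]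
      simp [h1, h2, h3, h4, h5, h6, h7, h8, h9, h10, h11, h12, h13, h14]
    have hkn : ∀ cI, pvContrib cI f = none := by
      intro cI
      simp [pvContrib, hnone]
    refine ⟨?_, ?_, ?_, ?_, ?_⟩ <;>
      simp [hstep, hkn, hhas, Ne.symm h1, Ne.symm h2, Ne.symm h3, Ne.symm h4, Ne.symm h5, Ne.symm h6, Ne.symm h7, Ne.symm h8, Ne.symm h9, Ne.symm h10, Ne.symm h11, Ne.symm h12, Ne.symm h13, Ne.symm h14, ih0, ih1, ih2, ih3, ih4,
        pvChain0, pvChain1, pvChain2, pvChain3, pvChain4, pvMerge_none_left]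

theorem pv_match3 (acc : List String) (b1 b2 b3 : Bool) (p1 p2 p3 : Int) (d1 d2 d3 : String) :
    (match (if b1 then some (p1, d1) else if b2 then some (p2, d2)
            else if b3 then some (p3, d3) else none) with
      | some p => acc ++ [p.2]
      | none => acc)
    = if b1 then acc ++ [d1] else if b2 then acc ++ [d2] else if b3 then acc ++ [d3] else acc := by
  cases b1 <;> cases b2 <;> cases b3 <;> rfl

theorem pv_match2 (acc : List String) (b1 b2 : Bool) (p1 p2 : Int) (d1 d2 : String) :
    (match (if b1 then some (p1, d1) else if b2 then some (p2, d2) else none) with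
      | some p => acc ++ [p.2]
      | none => acc)
    = if b1 then acc ++ [d1] else if b2 then acc ++ [d2] else acc := by
  cases b1 <;> cases b2 <;> rfl

theorem pv_unrec (x : String) :
    (PySem.Dict.get? pvFeatureInfo x).isSome = PySem.Set.contains (PySem.Set.ofList
      ["first_person", "second_person", "third_person", "singular", "plural", "dual",
       "masculine", "feminine", "nominative", "accusative", "genitive",
       "subject", "object", "predicate"]) x := by
  rw [← PySem.Dict.contains_eq_isSome_get?]
  have hk : PySem.Dict.keys pvFeatureInfo =
      ["first_person", "second_person", "third_person", "singular", "plural", "dual",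
       "masculine", "feminine", "nominative", "accusative", "genitive",
       "subject", "object", "predicate"] := rfl
  rw [PySem.Dict.contains_eq_decide_mem_keys, hk]
  simp [pysem]

theorem pv_main (role : String) (features : List String) :
    generate_meaning_from_role_and_features_py role features
      = generate_meaning_from_role_and_features_py_alt role features := by
  unfold generate_meaning_from_role_and_features_py generate_meaning_from_role_and_features_py_alt
  obtain ⟨hC0, hC1, hC2, hC3, hC4⟩ := pvCand_spec features
  have hslots : ∀ cI : Int,
      PySem.Dict.get? ((features.foldl pvBStep
        ((PySem.Dict.empty : PySem.Dict Int (Int × String)), ([] : List String))).1) cI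
        = pvCand cI features := by
    intro cI
    rw [pvFold_fst]
    simp [pvMerge_none_left]
  have hrange : PySem.List.pyRange 0 5 1 = [0, 1, 2, 3, 4] := rfl
  have hAB : ∀ k, PySem.Set.contains
      (PySem.Set.ofList (features.map (fun f => PySem.Str.lower f))) k = pvHas features k := by
    intro k
    simp [pysem, pvHas]
  have hleft : (features.foldl pvBStep
      ((PySem.Dict.empty : PySem.Dict Int (Int × String)), ([] : List String))).2
      = features.filter (fun f => !(PySem.Set.contains (PySem.Set.ofList
          ["first_person", "second_person", "third_person", "singular", "plural", "dual",
           "masculine", "feminine", "nominative", "accusative", "genitive",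
           "subject", "object", "predicate"]) (PySem.Str.lower f))) := by
    rw [pvFold_snd]
    simp only [List.nil_append]
    apply List.filter_congr
    intro x _
    rw [pv_unrec]
  simp only [hrange, List.foldl_cons, List.foldl_nil]
  rw [hslots 0, hslots 1, hslots 2, hslots 3, hslots 4, hC0, hC1, hC2, hC3, hC4, hleft]
  simp only [pvChain0, pvChain1, pvChain2, pvChain3, pvChain4,
    pv_match3, pv_match2, hAB]

-- ===== VERDICT (by name: the statement is the Claim_ definition above) =====
theorem generate_meaning_from_role_and_features_py_spec : Claim_equal_generate_meaning_from_role_and_features_py := by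
  intro role features _
  unfold Spec_generate_meaning_from_role_and_features_py
  exact pv_main role features
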